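-- pv_equiv track=rewrite | github.com/bensonk/AoC | 2023/day11/part2.py | count_tripwires
-- ===== SOURCE A (Python) =====
-- def count_tripwires(a, b, xs, ys):
--   total = 0
--   start = min(a[0], b[0])
--   end = max(a[0], b[0])
--   for i in range(start, end+1):
--     if i in xs:
--       total += 1
--   start = min(a[1], b[1])
--   end = max(a[1], b[1])
--   for i in range(start, end+1):
--     if i in ys:
--       total += 1
--   return total * (1000000 - 1)
-- ===== SOURCE B (Python) =====
-- def count_tripwires(a, b, xs, ys):
--   def bisect_left(s, x):
--     lo, hi = 0, len(s)
--     while lo < hi: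
--       mid = (lo + hi) // 2
--       if s[mid] < x:
--         lo = mid + 1
--       else:
--         hi = mid
--     return lo
--   def crossed(p, q, vs):
--     lo, hi = (p, q) if p <= q else (q, p)
--     s = sorted(set(vs))
--     return bisect_left(s, hi + 1) - bisect_left(s, lo)
--   return (crossed(a[0], b[0], xs) + crossed(a[1], b[1], ys)) * 999999
-- ===== Notes on version B (the rewrite author's own statement) =====
-- stated objective: alternative
-- what changed: Instead of walking every integer of the coordinate range and scanning the list for it, B sorts the distinct coordinates once and takes the difference of two binary-search cut points (bisect_left at lo and at hi+1).
import Mathlib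
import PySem

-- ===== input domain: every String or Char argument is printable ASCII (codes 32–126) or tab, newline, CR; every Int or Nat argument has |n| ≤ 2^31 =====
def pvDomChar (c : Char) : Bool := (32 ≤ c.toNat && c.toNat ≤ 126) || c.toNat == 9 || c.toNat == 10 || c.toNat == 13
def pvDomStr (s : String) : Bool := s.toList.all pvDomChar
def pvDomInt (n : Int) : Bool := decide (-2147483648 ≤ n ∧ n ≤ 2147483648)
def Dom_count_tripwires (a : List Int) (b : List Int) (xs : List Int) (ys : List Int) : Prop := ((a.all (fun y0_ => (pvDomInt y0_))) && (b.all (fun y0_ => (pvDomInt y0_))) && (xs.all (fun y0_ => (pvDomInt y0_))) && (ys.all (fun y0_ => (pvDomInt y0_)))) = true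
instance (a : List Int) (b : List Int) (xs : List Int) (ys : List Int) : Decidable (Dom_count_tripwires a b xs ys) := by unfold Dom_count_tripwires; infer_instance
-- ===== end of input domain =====

-- B replaces A's per-integer scan of the coordinate range by sorting the distinct coordinates
-- once and subtracting two binary-search cut points (objective: alternative algorithm).

-- ===== PORT A =====
-- one 'for i in range(start, end+1): if i in vs: total += 1' loop of A
def ctLoop (start stop : Int) (vs : List Int) (total : Int) : Int :=
  (PySem.List.pyRange start stop 1).foldl (fun t i => if i ∈ vs then t + 1 else t) total

def count_tripwires (a : List Int) (b : List Int) (xs : List Int) (ys : List Int) : Int :=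
  match PySem.List.pyGet? a 0, PySem.List.pyGet? b 0, PySem.List.pyGet? a 1, PySem.List.pyGet? b 1 with
  | some a0, some b0, some a1, some b1 =>
      let total := ctLoop (min a0 b0) (max a0 b0 + 1) xs 0
      let total := ctLoop (min a1 b1) (max a1 b1 + 1) ys total
      total * (1000000 - 1)
  | _, _, _, _ => 0   -- IndexError in Python; excluded by Pre_

-- ===== PORT B =====
-- Source B's hand-written bisect_left is letter-for-letter the standard lo/hi//2 loop of
-- Python's bisect.bisect_left, which PySem provides as PySem.List.bisectLeft (same loop).
-- crossed(p, q, vs) = bisect_left(s, hi+1) - bisect_left(s, lo) on s = sorted(set(vs))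
def crossedB (p q : Int) (vs : List Int) : Int :=
  let lo := if p ≤ q then p else q
  let hi := if p ≤ q then q else p
  let s := PySem.List.sorted (PySem.Set.ofList vs) (fun x => x) false
  ((PySem.List.bisectLeft s (hi + 1) : Int) - (PySem.List.bisectLeft s lo : Int))

def count_tripwires_alt (a : List Int) (b : List Int) (xs : List Int) (ys : List Int) : Int :=
  (((PySem.List.pyGet? a 0).bind fun a0 =>
    (PySem.List.pyGet? b 0).bind fun b0 =>
    (PySem.List.pyGet? a 1).bind fun a1 =>
    (PySem.List.pyGet? b 1).map fun b1 =>
      (crossedB a0 b0 xs + crossedB a1 b1 ys) * 999999).getD 0)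
  -- none (= IndexError in Python) collapses to 0; excluded by Pre_

-- ===== PRECONDITION & SPEC =====
-- A (and B) raise IndexError when a or b has fewer than 2 elements; Pre_ excludes exactly those.
def Pre_count_tripwires (a : List Int) (b : List Int) (xs : List Int) (ys : List Int) : Prop :=
  2 ≤ a.length ∧ 2 ≤ b.length
instance (a : List Int) (b : List Int) (xs : List Int) (ys : List Int) : Decidable (Pre_count_tripwires a b xs ys) := by unfold Pre_count_tripwires; infer_instance

def pvWitness_count_tripwires : List Int × List Int × List Int × List Int :=
  ([0, 3], [4, 1], [1, 2, 9], [2, 2])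

def Spec_count_tripwires (a : List Int) (b : List Int) (xs : List Int) (ys : List Int) (out : Int) : Prop := out = count_tripwires_alt a b xs ys
instance (a : List Int) (b : List Int) (xs : List Int) (ys : List Int) (out : Int) : Decidable (Spec_count_tripwires a b xs ys out) := by unfold Spec_count_tripwires; infer_instance

-- ===== CLAIM (what is proved, stated in full; the proofs are below) =====
def Claim_equal_count_tripwires : Prop := ∀ (a : List Int) (b : List Int) (xs : List Int) (ys : List Int), Dom_count_tripwires a b xs ys → Pre_count_tripwires a b xs ys → Spec_count_tripwires a b xs ys (count_tripwires a b xs ys)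

-- ===== LEMMAS AND PROOFS =====

-- A's loop just counts the range elements that lie in vs
theorem ctLoop_eq_countP (start stop : Int) (vs : List Int) (total : Int) :
    ctLoop start stop vs total
      = total + ((PySem.List.pyRange start stop 1).countP (fun i => decide (i ∈ vs)) : Int) := by
  unfold ctLoop
  generalize PySem.List.pyRange start stop 1 = l
  induction l generalizing total with
  | nil => simp
  | cons x l ih =>
      simp only [List.foldl_cons, List.countP_cons, ih]
      by_cases h : x ∈ vs <;> simp [h] <;> ring

-- counting range elements that lie in vs = counting distinct vs-elements in the interval
theorem countP_range_eq_countP_sorted (lo hi : Int) (vs : List Int) :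
    (PySem.List.pyRange lo (hi + 1) 1).countP (fun i => decide (i ∈ vs))
      = (PySem.List.sorted (PySem.Set.ofList vs) (fun x => x) false).countP
          (fun v => decide (lo ≤ v ∧ v ≤ hi)) := by
  rw [List.countP_eq_length_filter, List.countP_eq_length_filter]
  apply List.Perm.length_eq
  have hnd : (PySem.List.sorted (PySem.Set.ofList vs) (fun x => x) false).Nodup :=
    (PySem.List.sorted_ofList_pairwise_lt (xs := vs)).imp ne_of_lt
  rw [List.perm_ext_iff_of_nodup
        (List.Nodup.filter _ (PySem.List.nodup_pyRange_one _ _))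
        (List.Nodup.filter _ hnd)]
  intro v
  simp [List.mem_filter, PySem.List.mem_pyRange_one, PySem.List.mem_sorted,
        PySem.Set.mem_ofList]
  tauto

-- a countP over a strictly sorted list with interval predicate = difference of bisect cuts
theorem countP_interval_eq_bisect_sub (s : List Int) (hs : s.Pairwise (· ≤ ·))
    (lo hi : Int) (hlohi : lo ≤ hi) :
    (s.countP (fun v => decide (lo ≤ v ∧ v ≤ hi)) : Int)
      = (PySem.List.bisectLeft s (hi + 1) : Int) - (PySem.List.bisectLeft s lo : Int) := by
  obtain ⟨hk2len, hk2lt, hk2ge⟩ := PySem.List.bisectLeft_spec s (hi + 1) hs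
  obtain ⟨hk1len, hk1lt, hk1ge⟩ := PySem.List.bisectLeft_spec s lo hs
  set k1 := PySem.List.bisectLeft s lo with hk1
  set k2 := PySem.List.bisectLeft s (hi + 1) with hk2
  have hk12 : k1 ≤ k2 := by
    by_contra hc
    push_neg at hc
    have hj : k2 < s.length := lt_of_lt_of_le hc hk1len
    have h1 := hk1lt k2 hj hc
    have h2 := hk2ge k2 hj (le_refl _)
    omega
  -- rewrite the list countP as a countP over indices
  have hmap : (PySem.List.pyRange 0 (s.length : Int) 1).map (fun j => PySem.List.pyGetD s j 0) = s :=
    PySem.List.map_pyGetD_pyRange_zero s 0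
  have hidx : s.countP (fun v => decide (lo ≤ v ∧ v ≤ hi))
      = (PySem.List.pyRange 0 (s.length : Int) 1).countP
          (fun j => decide ((k1 : Int) ≤ j ∧ j < (k2 : Int))) := by
    conv_lhs => rw [← hmap]
    rw [List.countP_map]
    apply List.countP_congr
    intro j hj
    rw [PySem.List.mem_pyRange_one] at hj
    obtain ⟨hj0, hjlen⟩ := hj
    have hjn : j.toNat < s.length := by omega
    have hget : PySem.List.pyGetD s j 0 = s[j.toNat] :=
      PySem.List.pyGetD_eq_getElem s 0 hj0 hjlen
    simp only [Function.comp, hget]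
    by_cases h1 : j.toNat < k1
    · have := hk1lt j.toNat (by omega) h1
      simp; omega
    · by_cases h2 : j.toNat < k2
      · have ha := hk1ge j.toNat (by omega) (by omega)
        have hb := hk2lt j.toNat (by omega) h2
        simp; omega
      · have := hk2ge j.toNat (by omega) (by omega)
        simp; omega
  -- split the index range at k1 and k2
  have hsplit : PySem.List.pyRange 0 (s.length : Int) 1
      = PySem.List.pyRange 0 (k1 : Int) 1 ++ (PySem.List.pyRange (k1 : Int) (k2 : Int) 1
          ++ PySem.List.pyRange (k2 : Int) (s.length : Int) 1) := by
    rw [← PySem.List.pyRange_one_append (k1 : Int) (k2 : Int) (s.length : Int)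
          (by exact_mod_cast hk12) (by exact_mod_cast hk2len),
        ← PySem.List.pyRange_one_append 0 (k1 : Int) (s.length : Int)
          (by positivity) (by exact_mod_cast le_trans hk12 hk2len)]
  rw [hidx, hsplit, List.countP_append, List.countP_append]
  have c1 : (PySem.List.pyRange 0 (k1 : Int) 1).countP
      (fun j => decide ((k1 : Int) ≤ j ∧ j < (k2 : Int))) = 0 := by
    rw [List.countP_eq_zero]
    intro j hj
    rw [PySem.List.mem_pyRange_one] at hj
    simp; omega
  have c3 : (PySem.List.pyRange (k2 : Int) (s.length : Int) 1).countP
      (fun j => decide ((k1 : Int) ≤ j ∧ j < (k2 : Int))) = 0 := by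
    rw [List.countP_eq_zero]
    intro j hj
    rw [PySem.List.mem_pyRange_one] at hj
    simp; omega
  have c2 : (PySem.List.pyRange (k1 : Int) (k2 : Int) 1).countP
      (fun j => decide ((k1 : Int) ≤ j ∧ j < (k2 : Int)))
      = (PySem.List.pyRange (k1 : Int) (k2 : Int) 1).length := by
    rw [List.countP_eq_length]
    intro j hj
    rw [PySem.List.mem_pyRange_one] at hj
    simp; omega
  rw [c1, c3, c2, PySem.List.length_pyRange_one]
  push_cast
  omega

-- the whole per-axis count: A's loop increment = B's crossedB
theorem count_axis_eq (p q : Int) (vs : List Int) :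
    ((PySem.List.pyRange (min p q) (max p q + 1) 1).countP (fun i => decide (i ∈ vs)) : Int)
      = crossedB p q vs := by
  unfold crossedB
  rw [← min_def, ← max_def]
  rw [countP_range_eq_countP_sorted (min p q) (max p q) vs]
  exact countP_interval_eq_bisect_sub _
    ((PySem.List.sorted_ofList_pairwise_lt (xs := vs)).imp le_of_lt)
    (min p q) (max p q) (min_le_max)

-- ===== VERDICT (by name: the statement is the Claim_ definition above) =====
theorem count_tripwires_spec : Claim_equal_count_tripwires := by
  intro a b xs ys _ hpre
  obtain ⟨ha, hb⟩ := hpre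
  unfold Spec_count_tripwires count_tripwires count_tripwires_alt
  rcases a with _ | ⟨a0, a⟩; · simp at ha
  rcases a with _ | ⟨a1, a⟩; · simp at ha
  rcases b with _ | ⟨b0, b⟩; · simp at hb
  rcases b with _ | ⟨b1, b⟩; · simp at hb
  simp only [PySem.List.pyGet?, PySem.List.pyIdx?]
  norm_num
  simp only [ctLoop_eq_countP, count_axis_eq]
  have hca : (0:Int) ≤ (a.length:Int) + 1 := by positivity
  have hcb : (0:Int) ≤ (b.length:Int) + 1 := by positivity
  simp [hca, hcb]
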